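-- pv_equiv track=rewrite | github.com/2visionspzoo/pdf-to-xml-app | app/parsers/universal_parser_v4.py | _extract_buyer_section
-- ===== SOURCE A (Python) =====
-- def _extract_buyer_section(text: str, start_pos: int) -> str:
--     """Wyciąga sekcję nabywcy"""
--     end_keywords = ['Lp', 'L.p.', 'Pozycje', 'Santander', 'Razem', 'PKO', 'Items']
--     end_pos = len(text)
--
--     for kw in end_keywords:
--         pos = text.find(kw, start_pos)
--         if pos != -1:
--             end_pos = min(end_pos, pos)
--
--     return text[start_pos:end_pos]
-- ===== SOURCE B (Python) =====
-- def _extract_buyer_section(text: str, start_pos: int) -> str: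
--     """Wyciąga sekcję nabywcy"""
--     end_keywords = ('Lp', 'L.p.', 'Pozycje', 'Santander', 'Razem', 'PKO', 'Items')
--     section = text[start_pos:]
--     for i in range(len(section)):
--         if section.startswith(end_keywords, i):
--             return section[:i]
--     return section
-- ===== Notes on version B (the rewrite author's own statement) =====
-- stated objective: alternative
-- what changed: Instead of running seven separate find-scans (one per end keyword) and taking the minimum hit position, B slices the section off once and makes a single left-to-right scan that cuts it at the first position where any end keyword starts (str.startswith with a tuple).
import Mathlib
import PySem

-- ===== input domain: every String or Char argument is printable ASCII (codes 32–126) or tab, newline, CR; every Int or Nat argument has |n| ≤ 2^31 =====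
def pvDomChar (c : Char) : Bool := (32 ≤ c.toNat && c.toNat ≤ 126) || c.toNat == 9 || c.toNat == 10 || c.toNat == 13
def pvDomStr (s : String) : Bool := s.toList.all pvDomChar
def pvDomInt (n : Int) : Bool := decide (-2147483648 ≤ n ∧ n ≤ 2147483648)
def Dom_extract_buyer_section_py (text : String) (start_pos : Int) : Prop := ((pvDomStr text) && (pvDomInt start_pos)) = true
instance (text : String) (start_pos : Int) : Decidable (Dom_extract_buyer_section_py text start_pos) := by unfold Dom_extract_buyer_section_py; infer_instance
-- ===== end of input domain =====

-- B replaces A's seven separate find-then-min scans by slicing the section off once and making a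
-- single left-to-right scan that cuts it at the first keyword start (alternative decomposition; no speed claim).


-- ===== PORT A =====
-- A: for each of the seven keywords, find its first occurrence at or after start_pos
-- and keep the minimum; slice from start_pos to that minimum.
def extract_buyer_section_py (text : String) (start_pos : Int) : String :=
  let end_keywords : List String := ["Lp", "L.p.", "Pozycje", "Santander", "Razem", "PKO", "Items"]
  let end_pos : Int := end_keywords.foldl
    (fun ep kw =>
      let pos := PySem.Str.findFrom text kw start_pos
      if pos ≠ -1 then min ep pos else ep)
    (PySem.Str.len text)
  PySem.Str.slice text (some start_pos) (some end_pos)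

-- ===== PORT B =====
-- B's loop 'for i in range(len(section)): if section.startswith(end_keywords, i): return section[:i]'
-- as structural recursion on the suffix: index of the first position whose suffix starts with some
-- keyword (length of the list when the loop falls through).
def pvFirstHit (kws : List (List Char)) : List Char → Nat
  | [] => 0
  | c :: rest => if kws.any (fun k => k.isPrefixOf (c :: rest)) then 0 else pvFirstHit kws rest + 1

def extract_buyer_section_py_alt (text : String) (start_pos : Int) : String :=
  let kws : List (List Char) :=
    ["Lp".toList, "L.p.".toList, "Pozycje".toList, "Santander".toList, "Razem".toList, "PKO".toList, "Items".toList]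
  let sec : String := PySem.Str.slice text (some start_pos) none
  PySem.Str.slice sec none (some ((pvFirstHit kws sec.toList : Nat) : Int))

-- ===== PRECONDITION & SPEC =====
def Spec_extract_buyer_section_py (text : String) (start_pos : Int) (out : String) : Prop := out = extract_buyer_section_py_alt text start_pos
instance (text : String) (start_pos : Int) (out : String) : Decidable (Spec_extract_buyer_section_py text start_pos out) := by unfold Spec_extract_buyer_section_py; infer_instance

-- ===== CLAIM (what is proved, stated in full; the proofs are below) =====
def Claim_equal_extract_buyer_section_py : Prop := ∀ (text : String) (start_pos : Int), Dom_extract_buyer_section_py text start_pos → Spec_extract_buyer_section_py text start_pos (extract_buyer_section_py text start_pos)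

-- ===== LEMMAS AND PROOFS =====

theorem pv_clampIdx_eq (n : Nat) (i : Int) :
    PySem.List.clampIdx n i = if 0 ≤ i then min i.toNat n else ((n : Int) + i).toNat := by
  simp [PySem.List.clampIdx]; split_ifs <;> omega

-- s.find(sub, start) equals the find on the suffix at the clamped start (sub nonempty).
theorem pv_findFrom_clamp (cs sub : List Char) (hsub : sub ≠ []) (i : Int) :
    PySem.Chars.findFrom cs sub i none =
      (if PySem.Chars.find (cs.drop (PySem.List.clampIdx cs.length i)) sub = -1 then -1
       else ↑(PySem.List.clampIdx cs.length i) +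
            PySem.Chars.find (cs.drop (PySem.List.clampIdx cs.length i)) sub) := by
  rcases (by omega : 0 ≤ i ∨ i < 0) with h0 | h0
  · rcases (by omega : i ≤ (cs.length : Int) ∨ (cs.length : Int) < i) with hle | hlt
    · have hc : PySem.List.clampIdx cs.length i = i.toNat := by
        rw [pv_clampIdx_eq]; simp [h0]; omega
      rw [hc]
      have hi : i = ((i.toNat : Nat) : Int) := (Int.toNat_of_nonneg h0).symm
      rw [hi]
      exact PySem.Chars.findFrom_natCast cs sub i.toNat (by omega)
    · have hc : PySem.List.clampIdx cs.length i = cs.length := by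
        rw [pv_clampIdx_eq]; simp [h0]; omega
      rw [hc, List.drop_length]
      have hfind : PySem.Chars.find [] sub = -1 :=
        (PySem.Chars.find_eq_neg_one_iff _ _).2 (by simpa [List.infix_nil] using hsub)
      rw [if_pos hfind]
      simp [PySem.Chars.findFrom, show ¬ i < 0 by omega, hlt]
  · have hk : PySem.List.clampIdx cs.length i ≤ cs.length := PySem.List.clampIdx_le cs.length i
    rw [← PySem.Chars.findFrom_natCast cs sub (PySem.List.clampIdx cs.length i) hk]
    have hc : (PySem.List.clampIdx cs.length i : Int) =
        if i + (cs.length : Int) < 0 then 0 else i + cs.length := by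
      rw [pv_clampIdx_eq]; simp [show ¬ (0:Int) ≤ i by omega]; split_ifs <;> omega
    simp only [PySem.Chars.findFrom]
    rw [if_pos h0, if_neg (by omega : ¬ ((PySem.List.clampIdx cs.length i : Int) < 0)), ← hc]

-- A's per-keyword fold step, on the suffix t.
def pvStep (t : List Char) (ep : Int) (k : List Char) : Int :=
  if PySem.Chars.find t k ≠ -1 then min ep (PySem.Chars.find t k) else ep

-- Fold invariant for the running minimum.
theorem pv_fold_inv (t : List Char) (kws : List (List Char)) (a : Int) :
    (kws.foldl (pvStep t) a = a ∨
      ∃ k ∈ kws, kws.foldl (pvStep t) a = PySem.Chars.find t k ∧ PySem.Chars.find t k ≠ -1) ∧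
    kws.foldl (pvStep t) a ≤ a ∧
    (∀ k ∈ kws, PySem.Chars.find t k ≠ -1 → kws.foldl (pvStep t) a ≤ PySem.Chars.find t k) := by
  induction kws generalizing a with
  | nil => simp
  | cons kw rest ih =>
    simp only [List.foldl_cons]
    obtain ⟨ihm, ihle, ihmin⟩ := ih (pvStep t a kw)
    by_cases hkw : PySem.Chars.find t kw ≠ -1
    · have hstep : pvStep t a kw = min a (PySem.Chars.find t kw) := by simp [pvStep, hkw]
      refine ⟨?_, ?_, ?_⟩
      · rcases ihm with h | ⟨k, hk, h1, h2⟩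
        · rw [h, hstep]
          rcases min_cases a (PySem.Chars.find t kw) with ⟨h3, _⟩ | ⟨h3, _⟩
          · exact Or.inl h3
          · exact Or.inr ⟨kw, by simp, h3, hkw⟩
        · exact Or.inr ⟨k, by simp [hk], h1, h2⟩
      · calc rest.foldl (pvStep t) (pvStep t a kw) ≤ pvStep t a kw := ihle
          _ ≤ a := by rw [hstep]; exact min_le_left _ _
      · intro k hk hfk
        rcases List.mem_cons.1 hk with rfl | hk'
        · calc rest.foldl (pvStep t) (pvStep t a k) ≤ pvStep t a k := ihle
            _ ≤ PySem.Chars.find t k := by simp [pvStep, hfk]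
        · exact ihmin k hk' hfk
    · have hstep : pvStep t a kw = a := by
        unfold pvStep; rw [if_neg (not_not_intro (not_not.1 hkw))]
      rw [hstep]
      obtain ⟨ihm', ihle', ihmin'⟩ := ih a
      refine ⟨?_, ihle', ?_⟩
      · rcases ihm' with h | ⟨k, hk, h1, h2⟩
        · exact Or.inl h
        · exact Or.inr ⟨k, by simp [hk], h1, h2⟩
      · intro k hk hfk
        rcases List.mem_cons.1 hk with rfl | hk'
        · exact absurd hfk hkw
        · exact ihmin' k hk' hfk

-- A's full-text fold equals the clamp plus the fold on the suffix.
theorem pv_lift (text : String) (i : Int) (kws : List String)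
    (h : ∀ kw ∈ kws, kw.toList ≠ []) (a : Int) :
    kws.foldl
      (fun ep kw =>
        let pos := PySem.Str.findFrom text kw i
        if pos ≠ -1 then min ep pos else ep)
      (↑(PySem.List.clampIdx text.toList.length i) + a)
    = ↑(PySem.List.clampIdx text.toList.length i) +
      (kws.map String.toList).foldl
        (pvStep (text.toList.drop (PySem.List.clampIdx text.toList.length i))) a := by
  induction kws generalizing a with
  | nil => simp
  | cons kw rest ih =>
    have hkw := h kw (by simp)
    have hrest : ∀ k ∈ rest, k.toList ≠ [] := fun k hk => h k (by simp [hk])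
    simp only [List.foldl_cons, List.map_cons]
    have hff : PySem.Str.findFrom text kw i =
        (if PySem.Chars.find (text.toList.drop (PySem.List.clampIdx text.toList.length i)) kw.toList = -1 then -1
         else ↑(PySem.List.clampIdx text.toList.length i) +
              PySem.Chars.find (text.toList.drop (PySem.List.clampIdx text.toList.length i)) kw.toList) := by
      rw [PySem.Str.findFrom_eq]
      exact pv_findFrom_clamp text.toList kw.toList hkw i
    by_cases hf : PySem.Chars.find (text.toList.drop (PySem.List.clampIdx text.toList.length i)) kw.toList = -1
    · rw [hf, if_pos rfl] at hff
      simp only [hff]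
      rw [if_neg (by simp)]
      have hstep : pvStep (text.toList.drop (PySem.List.clampIdx text.toList.length i)) a kw.toList = a := by
        unfold pvStep; rw [if_neg (not_not_intro hf)]
      rw [hstep]
      exact ih hrest a
    · rw [if_neg hf] at hff
      have hge : 0 ≤ PySem.Chars.find (text.toList.drop (PySem.List.clampIdx text.toList.length i)) kw.toList := by
        have := PySem.Chars.neg_one_le_find (text.toList.drop (PySem.List.clampIdx text.toList.length i)) kw.toList
        omega
      simp only [hff]
      rw [if_pos (by omega)]
      have hstep : pvStep (text.toList.drop (PySem.List.clampIdx text.toList.length i)) a kw.toList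
          = min a (PySem.Chars.find (text.toList.drop (PySem.List.clampIdx text.toList.length i)) kw.toList) := by
        unfold pvStep; rw [if_pos hf]
      rw [hstep]
      rw [show min (↑(PySem.List.clampIdx text.toList.length i) + a)
            (↑(PySem.List.clampIdx text.toList.length i) +
              PySem.Chars.find (text.toList.drop (PySem.List.clampIdx text.toList.length i)) kw.toList)
          = ↑(PySem.List.clampIdx text.toList.length i) +
            min a (PySem.Chars.find (text.toList.drop (PySem.List.clampIdx text.toList.length i)) kw.toList) by omega]
      exact ih hrest _

-- Characterisation of A's minimum over the suffix t.
theorem pv_minA_char (t : List Char) (kws : List (List Char)) :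
    0 ≤ kws.foldl (pvStep t) ↑t.length ∧
    kws.foldl (pvStep t) ↑t.length ≤ ↑t.length ∧
    (∀ j < (kws.foldl (pvStep t) ↑t.length).toNat, ∀ k ∈ kws, ¬ k <+: t.drop j) ∧
    (kws.foldl (pvStep t) ↑t.length < ↑t.length →
      ∃ k ∈ kws, k <+: t.drop (kws.foldl (pvStep t) ↑t.length).toNat) := by
  obtain ⟨hm, hle, hmin⟩ := pv_fold_inv t kws ↑t.length
  have h0 : 0 ≤ kws.foldl (pvStep t) ↑t.length := by
    rcases hm with h | ⟨k, _, h1, h2⟩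
    · rw [h]; positivity
    · have := PySem.Chars.neg_one_le_find t k; omega
  refine ⟨h0, hle, ?_, ?_⟩
  · intro j hj k hk hpre
    have hinf : k <:+: t := by
      have : ∃ j', k <+: t.drop j' := ⟨j, hpre⟩
      rw [PySem.Chars.exists_prefix_drop_iff_isIn, PySem.Chars.isIn_iff_infix] at this
      exact this
    have hne : PySem.Chars.find t k ≠ -1 := (PySem.Chars.find_ne_neg_one_iff t k).2 hinf
    have hple := hmin k hk hne
    have hfge : 0 ≤ PySem.Chars.find t k := by
      have := PySem.Chars.neg_one_le_find t k; omega
    exact (PySem.Chars.find_spec hfge).2 j (by omega) hpre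
  · intro hlt
    rcases hm with h | ⟨k, hk, h1, h2⟩
    · omega
    · have hfge : 0 ≤ PySem.Chars.find t k := by
        have := PySem.Chars.neg_one_le_find t k; omega
      refine ⟨k, hk, ?_⟩
      rw [h1]
      exact (PySem.Chars.find_spec hfge).1

-- Characterisation of B's first-hit scan.
theorem pv_firstHit_char (kws : List (List Char)) (t : List Char) :
    pvFirstHit kws t ≤ t.length ∧
    (∀ j < pvFirstHit kws t, ∀ k ∈ kws, ¬ k <+: t.drop j) ∧
    (pvFirstHit kws t < t.length → ∃ k ∈ kws, k <+: t.drop (pvFirstHit kws t)) := by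
  induction t with
  | nil => simp [pvFirstHit]
  | cons c rest ih =>
    by_cases hhit : kws.any (fun k => k.isPrefixOf (c :: rest)) = true
    · have h0 : pvFirstHit kws (c :: rest) = 0 := by rw [pvFirstHit, if_pos hhit]
      rw [h0]
      refine ⟨by omega, by omega, fun _ => ?_⟩
      obtain ⟨k, hk, hp⟩ := List.any_eq_true.1 hhit
      exact ⟨k, hk, by simpa using List.isPrefixOf_iff_prefix.1 hp⟩
    · have h0 : pvFirstHit kws (c :: rest) = pvFirstHit kws rest + 1 := by
        rw [pvFirstHit, if_neg hhit]
      obtain ⟨ihle, ihmin, ihhit⟩ := ih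
      rw [h0]
      refine ⟨by simp; omega, ?_, ?_⟩
      · intro j hj k hk hpre
        match j with
        | 0 =>
          exact hhit (List.any_eq_true.2 ⟨k, hk, List.isPrefixOf_iff_prefix.2 (by simpa using hpre)⟩)
        | j' + 1 =>
          exact ihmin j' (by omega) k hk (by simpa using hpre)
      · intro hlt
        obtain ⟨k, hk, hp⟩ := ihhit (by simp at hlt; omega)
        exact ⟨k, hk, by simpa using hp⟩

-- The two characterisations pin the same value.
theorem pv_min_eq_firstHit (t : List Char) (kws : List (List Char)) :
    kws.foldl (pvStep t) ↑t.length = ↑(pvFirstHit kws t) := by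
  obtain ⟨h0, hle, hminA, hhitA⟩ := pv_minA_char t kws
  obtain ⟨hle', hminB, hhitB⟩ := pv_firstHit_char kws t
  rcases (by omega : (kws.foldl (pvStep t) ↑t.length).toNat < pvFirstHit kws t ∨
      pvFirstHit kws t < (kws.foldl (pvStep t) ↑t.length).toNat ∨
      (kws.foldl (pvStep t) ↑t.length).toNat = pvFirstHit kws t) with hc | hc | hc
  · obtain ⟨k, hk, hp⟩ := hhitA (by omega)
    exact absurd hp (hminB _ hc k hk)
  · obtain ⟨k, hk, hp⟩ := hhitB (by omega)
    exact absurd hp (hminA _ hc k hk)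
  · omega

-- Slicing from i equals slicing from the clamped start.
theorem pv_slice_start {α : Type} (xs : List α) (i b : Int) :
    PySem.List.slice xs (some i) (some b) =
      PySem.List.slice xs (some ((PySem.List.clampIdx xs.length i : Nat) : Int)) (some b) := by
  simp only [PySem.List.slice]
  rw [PySem.List.clampIdx_natCast]
  rw [min_eq_left (PySem.List.clampIdx_le xs.length i)]

theorem pv_main (text : String) (i : Int) :
    extract_buyer_section_py text i = extract_buyer_section_py_alt text i := by
  have hkw : ∀ kw ∈ (["Lp", "L.p.", "Pozycje", "Santander", "Razem", "PKO", "Items"] : List String),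
      kw.toList ≠ [] := by decide
  have hmap : (["Lp", "L.p.", "Pozycje", "Santander", "Razem", "PKO", "Items"] : List String).map String.toList
      = ["Lp".toList, "L.p.".toList, "Pozycje".toList, "Santander".toList, "Razem".toList, "PKO".toList, "Items".toList] := by
    decide
  set kws : List (List Char) :=
    ["Lp".toList, "L.p.".toList, "Pozycje".toList, "Santander".toList, "Razem".toList, "PKO".toList, "Items".toList] with hkws
  have hsle := PySem.List.clampIdx_le text.toList.length i
  set s' : Nat := PySem.List.clampIdx text.toList.length i with hs'
  set t : List Char := text.toList.drop s' with ht
  have htlen : t.length = text.toList.length - s' := by rw [ht, List.length_drop]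
  have hinit : PySem.Str.len text = (s' : Int) + (t.length : Int) := by
    simp only [PySem.Str.len, htlen]; omega
  -- B's section and its character list
  have hsec : (PySem.Str.slice text (some i) none).toList = t := by
    rw [PySem.Str.toList_slice, PySem.Chars.slice_eq_listSlice, PySem.List.slice_some_none, ht, hs']
  apply String.toList_inj.mp
  simp only [extract_buyer_section_py, extract_buyer_section_py_alt]
  rw [hinit, pv_lift text i _ hkw, hmap, ← hkws, ← hs', ← ht, pv_min_eq_firstHit]
  rw [hsec]
  rw [PySem.Str.toList_slice, PySem.Str.toList_slice, hsec]
  rw [PySem.Chars.slice_eq_listSlice, PySem.Chars.slice_eq_listSlice]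
  rw [pv_slice_start text.toList i, ← hs']
  rw [show ((s' : Int) + (pvFirstHit kws t : Int)) = (((s' + pvFirstHit kws t : Nat) : Int)) by push_cast; ring]
  rw [show ((s' + pvFirstHit kws t : Nat) : Int) = ((s' : Int) + ((pvFirstHit kws t : Nat) : Int)) by push_cast; ring]
  rw [PySem.List.slice_natCast_add, PySem.List.slice_to_natCast, ht]

-- ===== VERDICT (by name: the statement is the Claim_ definition above) =====
theorem extract_buyer_section_py_spec : Claim_equal_extract_buyer_section_py := by
  intro text start_pos _
  exact pv_main text start_pos
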